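-- pv_equiv track=rewrite | github.com/Ale96Pa/graph_validation | weighted_set_cover.py | searchMinCostMaxMetrics_fast
-- ===== SOURCE A (Python) =====
-- def searchMinCostMaxMetrics_fast(clusterCost,clusterMetrics):
-- 	#clusterMax = min(clusterCost.items(), key=lambda x: (x[1], -clusterMetrics[x[0]]))[0]
-- 	clusterMax = max(clusterMetrics.items(), key=lambda x: (x[1], -clusterMetrics[x[0]]))[0]
-- 	clusterMaxCost = clusterCost[clusterMax]
-- 	clusterMaxCover	=	clusterMetrics[clusterMax]
-- 	bestCluster = clusterMax
-- 	for x,y in clusterMetrics.items():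
-- 		if y == clusterMaxCover and clusterCost[x] < clusterMaxCost:
-- 		#if clusterCost[x] == clusterMaxCost and y > clusterMaxCover:
-- 			clusterMaxCost = clusterCost[x]
-- 			#clusterMaxCover = y
-- 			bestCluster = x
--
-- 	return bestCluster
-- ===== SOURCE B (Python) =====
-- def searchMinCostMaxMetrics_fast(clusterCost, clusterMetrics):
--     # Rank clusters by metric, highest first; the stable sort keeps insertion
--     # order inside each metric group, so the cheapest key of the top group is
--     # the same one A's rescan settles on.
--     ranked = sorted(clusterMetrics.items(), key=lambda kv: kv[1], reverse=True)
--     top = ranked[0][1]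
--     return min((k for k, v in ranked if v == top), key=lambda k: clusterCost[k])
-- ===== Notes on version B (the rewrite author's own statement) =====
-- stated objective: alternative
-- what changed: A makes two stateful passes in dict order (an argmax over the items, then a rescan with mutable bestCluster/clusterMaxCost state to lower the cost among metric ties); B sorts the items by metric descending (stable) and takes the min-cost key of the top-metric group, trading A's O(n) two-pass scan for an O(n log n) sort-then-select with no mutable state.
import Mathlib
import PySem

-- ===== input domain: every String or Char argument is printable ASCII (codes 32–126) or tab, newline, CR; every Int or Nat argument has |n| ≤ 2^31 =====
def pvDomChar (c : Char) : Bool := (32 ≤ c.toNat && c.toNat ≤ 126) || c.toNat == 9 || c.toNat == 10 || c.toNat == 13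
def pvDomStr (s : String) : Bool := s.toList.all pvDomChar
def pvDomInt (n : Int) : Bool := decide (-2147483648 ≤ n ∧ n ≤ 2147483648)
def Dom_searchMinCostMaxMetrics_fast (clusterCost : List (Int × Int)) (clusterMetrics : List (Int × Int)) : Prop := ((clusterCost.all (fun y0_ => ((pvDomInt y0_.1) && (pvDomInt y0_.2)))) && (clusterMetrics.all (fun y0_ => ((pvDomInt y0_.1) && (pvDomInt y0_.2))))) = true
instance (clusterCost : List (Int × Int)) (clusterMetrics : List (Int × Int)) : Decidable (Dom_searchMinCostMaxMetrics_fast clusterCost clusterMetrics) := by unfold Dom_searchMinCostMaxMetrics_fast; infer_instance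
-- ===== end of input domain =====

-- B replaces A's two stateful passes in dict order with a stable descending sort by metric followed
-- by a min-cost selection over the top-metric group (objective: alternative, sort-then-select).
-- Equivalence is about the return value; neither function mutates its arguments.

-- ===== PORT A =====
def searchMinCostMaxMetrics_fast (clusterCost : List (Int × Int)) (clusterMetrics : List (Int × Int)) : Int :=
  let m := PySem.Dict.ofList clusterMetrics
  let c := PySem.Dict.ofList clusterCost
  match PySem.List.max2? m.items (fun x => x.2) (fun x => -(m.getD x.1 0)) with
  | none => 0   -- Python raises ValueError on an empty dict; excluded by Pre_
  | some clusterMax =>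
    let clusterMaxCost := c.getD clusterMax.1 0        -- Python raises KeyError when absent; excluded by Pre_
    let clusterMaxCover := m.getD clusterMax.1 0
    let st := m.items.foldl
      (fun (s : Int × Int) p =>
        if p.2 == clusterMaxCover && decide (c.getD p.1 0 < s.2) then (p.1, c.getD p.1 0) else s)
      (clusterMax.1, clusterMaxCost)
    st.1

-- ===== PORT B =====
def searchMinCostMaxMetrics_fast_alt (clusterCost : List (Int × Int)) (clusterMetrics : List (Int × Int)) : Int :=
  let m := PySem.Dict.ofList clusterMetrics
  let c := PySem.Dict.ofList clusterCost
  let ranked := PySem.List.sorted m.items (fun kv => kv.2) true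
  match ranked with
  | [] => 0     -- Python raises IndexError at ranked[0] on an empty dict; excluded by Pre_
  | r0 :: _ =>
    match PySem.List.min? ((ranked.filter (fun kv => kv.2 == r0.2)).map (·.1))
        (fun k => c.getD k 0) with   -- Python raises KeyError when a top-metric cost is absent; excluded by Pre_
    | some k => k
    | none => 0 -- unreachable: r0 itself passes the filter

-- ===== PRECONDITION & SPEC =====
-- Pre_ excludes exactly the inputs where the Pythons raise: an empty clusterMetrics (A: ValueError,
-- B: IndexError) and inputs where some maximal-metric cluster is missing from clusterCost (KeyError
-- in both; those are the only costs either version reads).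
def Pre_searchMinCostMaxMetrics_fast (clusterCost : List (Int × Int)) (clusterMetrics : List (Int × Int)) : Prop :=
  clusterMetrics ≠ [] ∧
  ∀ p ∈ (PySem.Dict.ofList clusterMetrics).items,
    (∀ q ∈ (PySem.Dict.ofList clusterMetrics).items, q.2 ≤ p.2) →
    (PySem.Dict.ofList clusterCost).contains p.1 = true
instance (clusterCost : List (Int × Int)) (clusterMetrics : List (Int × Int)) : Decidable (Pre_searchMinCostMaxMetrics_fast clusterCost clusterMetrics) := by unfold Pre_searchMinCostMaxMetrics_fast; infer_instance

def pvWitness_searchMinCostMaxMetrics_fast : (List (Int × Int)) × (List (Int × Int)) := ([(1, 2), (2, 1)], [(1, 3), (2, 3)])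

def Spec_searchMinCostMaxMetrics_fast (clusterCost : List (Int × Int)) (clusterMetrics : List (Int × Int)) (out : Int) : Prop := out = searchMinCostMaxMetrics_fast_alt clusterCost clusterMetrics
instance (clusterCost : List (Int × Int)) (clusterMetrics : List (Int × Int)) (out : Int) : Decidable (Spec_searchMinCostMaxMetrics_fast clusterCost clusterMetrics out) := by unfold Spec_searchMinCostMaxMetrics_fast; infer_instance

-- ===== CLAIM (what is proved, stated in full; the proofs are below) =====
def Claim_equal_searchMinCostMaxMetrics_fast : Prop := ∀ (clusterCost : List (Int × Int)) (clusterMetrics : List (Int × Int)), Dom_searchMinCostMaxMetrics_fast clusterCost clusterMetrics → Pre_searchMinCostMaxMetrics_fast clusterCost clusterMetrics → Spec_searchMinCostMaxMetrics_fast clusterCost clusterMetrics (searchMinCostMaxMetrics_fast clusterCost clusterMetrics)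

-- ===== LEMMAS AND PROOFS =====

-- A's max2? on dict items equals the plain max? by the first key: the second key is redundant
lemma pv_max2_aux (M : PySem.Dict Int Int) (t : List (Int × Int)) (a : Int × Int)
    (hL : ∀ x ∈ a :: t, M.getD x.1 0 = x.2) :
    PySem.List.max2? (a :: t) (fun x => x.2) (fun x => -(M.getD x.1 0))
      = PySem.List.max? (a :: t) (fun x => x.2) := by
  induction t generalizing a with
  | nil => rfl
  | cons y t ih =>
    have ha : M.getD a.1 0 = a.2 := hL a (List.mem_cons_self)
    have hy : M.getD y.1 0 = y.2 := hL y (List.mem_cons_of_mem _ List.mem_cons_self)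
    have h1 : PySem.List.max2? (a :: y :: t) (fun x => x.2) (fun x => -(M.getD x.1 0))
        = PySem.List.max2? ((if a.2 < y.2 then y else a) :: t) (fun x => x.2) (fun x => -(M.getD x.1 0)) := by
      simp only [PySem.List.max2?, List.foldl_cons]
      simp only [ha, hy]
      by_cases h : a.2 < y.2
      · simp [h]
      · by_cases h2 : y.2 < a.2 <;> simp [h, h2]
    have h2 : PySem.List.max? (a :: y :: t) (fun x => x.2)
        = PySem.List.max? ((if a.2 < y.2 then y else a) :: t) (fun x => x.2) := by
      simp only [PySem.List.max?, List.foldl_cons]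
      by_cases h : a.2 < y.2 <;> simp [h]
    rw [h1, h2]
    refine ih _ ?_
    intro x hx
    rcases List.mem_cons.mp hx with rfl | hx
    · by_cases h : a.2 < y.2 <;> simp [h, ha, hy]
    · exact hL x (List.mem_cons_of_mem _ (List.mem_cons_of_mem _ hx))

lemma pv_max2_eq_max (M : PySem.Dict Int Int) (L : List (Int × Int))
    (hL : ∀ x ∈ L, M.getD x.1 0 = x.2) :
    PySem.List.max2? L (fun x => x.2) (fun x => -(M.getD x.1 0)) = PySem.List.max? L (fun x => x.2) := by
  cases L with
  | nil => rfl
  | cons a t => exact pv_max2_aux M t a hL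

-- cons form of the max? fold
lemma pv_max?_cons (t : List (Int × Int)) (a : Int × Int) :
    PySem.List.max? (a :: t) (fun x => x.2) = some (t.foldl (fun m x => if m.2 < x.2 then x else m) a) := by
  induction t generalizing a with
  | nil => rfl
  | cons y t ih =>
    have h1 : PySem.List.max? (a :: y :: t) (fun x => x.2)
        = PySem.List.max? ((if a.2 < y.2 then y else a) :: t) (fun x => x.2) := by
      simp only [PySem.List.max?, List.foldl_cons]
      by_cases h : a.2 < y.2 <;> simp [h]
    rw [h1, ih]
    simp only [List.foldl_cons]

-- cons form of the keyed min? fold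
lemma pv_min?_cons (f : Int → Int) (t : List Int) (a : Int) :
    PySem.List.min? (a :: t) f = some (t.foldl (fun m k => if f k < f m then k else m) a) := by
  induction t generalizing a with
  | nil => rfl
  | cons y t ih =>
    have h1 : PySem.List.min? (a :: y :: t) f = PySem.List.min? ((if f y < f a then y else a) :: t) f := by
      simp only [PySem.List.min?, List.foldl_cons]
      by_cases h : f y < f a <;> simp [h]
    rw [h1, ih]
    simp only [List.foldl_cons]

-- the running-max fold returns the first maximal element: everything before it is strictly smaller
lemma pv_fold_split (t : List (Int × Int)) (a : Int × Int) :
    (t.foldl (fun m x => if m.2 < x.2 then x else m) a = a ∧ ∀ q ∈ t, q.2 ≤ a.2) ∨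
    (∃ L1 L2, t = L1 ++ (t.foldl (fun m x => if m.2 < x.2 then x else m) a) :: L2 ∧
      a.2 < (t.foldl (fun m x => if m.2 < x.2 then x else m) a).2 ∧
      ∀ q ∈ L1, q.2 < (t.foldl (fun m x => if m.2 < x.2 then x else m) a).2) := by
  induction t generalizing a with
  | nil => left; simp
  | cons y t ih =>
    simp only [List.foldl_cons]
    by_cases h : a.2 < y.2
    · simp only [if_pos h]
      rcases ih y with ⟨heq, hle⟩ | ⟨L1, L2, hsplit, hlt, hsm⟩
      · right
        exact ⟨[], t, by simp [heq], by rw [heq]; exact h, by simp⟩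
      · right
        refine ⟨y :: L1, L2, ?_, lt_trans h hlt, ?_⟩
        · rw [List.cons_append, ← hsplit]
        · intro q hq
          rcases List.mem_cons.mp hq with rfl | hq
          · exact hlt
          · exact hsm q hq
    · simp only [if_neg h]
      rcases ih a with ⟨heq, hle⟩ | ⟨L1, L2, hsplit, hlt, hsm⟩
      · left
        refine ⟨heq, ?_⟩
        intro q hq
        rcases List.mem_cons.mp hq with rfl | hq
        · omega
        · exact hle q hq
      · right
        refine ⟨y :: L1, L2, ?_, hlt, ?_⟩
        · rw [List.cons_append, ← hsplit]
        · intro q hq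
          rcases List.mem_cons.mp hq with rfl | hq
          · omega
          · exact hsm q hq

-- A's stateful rescan is the keyed-min fold over the filtered keys
lemma pv_aloop_eq (mx : Int) (f : Int → Int) (L : List (Int × Int)) (b : Int) :
    (L.foldl (fun (s : Int × Int) p =>
        if p.2 == mx && decide (f p.1 < s.2) then (p.1, f p.1) else s) (b, f b)).1
    = ((L.filter (fun p => p.2 == mx)).map (·.1)).foldl (fun m k => if f k < f m then k else m) b := by
  induction L generalizing b with
  | nil => rfl
  | cons p t ih =>
    simp only [List.foldl_cons, List.filter_cons]
    by_cases hp : (p.2 == mx) = true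
    · simp only [hp, if_pos, Bool.true_and, List.map_cons, List.foldl_cons]
      by_cases h2 : f p.1 < f b
      · simp only [h2, decide_true, if_pos]
        rw [ih p.1]
      · simp only [h2, decide_false, if_false, Bool.false_eq_true]
        rw [ih b]
    · simp only [hp, Bool.false_and, if_false, Bool.false_eq_true]
      exact ih b

-- STABILITY of the insertion step: inserting into a descending list moves the new element past
-- every equal key, so a filter on one key value sees it appended at the end
lemma pv_filter_insertBy (c : Int) (x : Int × Int) (ys : List (Int × Int))
    (hys : ys.Pairwise (fun a b => b.2 ≤ a.2)) :
    (PySem.List.insertBy (fun a b => decide (b.2 < a.2)) x ys).filter (fun p => p.2 == c)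
      = ys.filter (fun p => p.2 == c) ++ (if x.2 == c then [x] else []) := by
  induction ys with
  | nil => simp [PySem.List.insertBy, List.filter_cons]
  | cons y ys ih =>
    rw [List.pairwise_cons] at hys
    show (if decide (y.2 < x.2) = true then x :: y :: ys
          else y :: PySem.List.insertBy (fun a b => decide (b.2 < a.2)) x ys).filter
            (fun p => p.2 == c) = _
    by_cases h : y.2 < x.2
    · rw [if_pos (by simp [h])]
      by_cases hx : (x.2 == c) = true
      · -- x's key is c and exceeds every key below: nothing else has key c
        have hnil : (y :: ys).filter (fun p => p.2 == c) = [] := by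
          rw [List.filter_eq_nil_iff]
          intro q hq
          rcases List.mem_cons.mp hq with rfl | hq
          · simp at hx ⊢; omega
          · have := hys.1 q hq; simp at hx ⊢; omega
        rw [List.filter_cons, if_pos hx, hnil, if_pos hx]
        simp
      · rw [List.filter_cons, if_neg hx, if_neg hx]
        simp
    · rw [if_neg (by simp [h]), List.filter_cons, List.filter_cons]
      by_cases hy : (y.2 == c) = true
      · rw [if_pos hy, if_pos hy, ih hys.2, List.cons_append]
      · rw [if_neg hy, if_neg hy, ih hys.2]

-- STABILITY of the sort: filtering on one key value commutes with the stable descending sort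
lemma pv_filter_sorted_rev (xs : List (Int × Int)) (c : Int) :
    (PySem.List.sorted xs (fun kv => kv.2) true).filter (fun p => p.2 == c)
      = xs.filter (fun p => p.2 == c) := by
  induction xs using List.reverseRecOn with
  | nil => rfl
  | append_singleton xs x ih =>
    have hs : PySem.List.sorted (xs ++ [x]) (fun kv => kv.2) true
        = PySem.List.insertBy (fun a b => decide (b.2 < a.2)) x
            (PySem.List.sorted xs (fun kv => kv.2) true) := by
      rw [PySem.List.sorted_rev_eq_foldl_insertBy, PySem.List.sorted_rev_eq_foldl_insertBy,
        List.foldl_append, List.foldl_cons, List.foldl_nil]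
    rw [hs, pv_filter_insertBy c x _ (PySem.List.sorted_pairwise_rev xs (fun kv => kv.2)), ih,
      List.filter_append]
    congr 1
    simp [List.filter_cons]

-- A = B on the ports, everywhere (the Pythons raise outside Pre_; the ports agree unconditionally)
lemma pv_main_eq (clusterCost clusterMetrics : List (Int × Int)) :
    searchMinCostMaxMetrics_fast clusterCost clusterMetrics
      = searchMinCostMaxMetrics_fast_alt clusterCost clusterMetrics := by
  unfold searchMinCostMaxMetrics_fast searchMinCostMaxMetrics_fast_alt
  dsimp only
  set M := PySem.Dict.ofList clusterMetrics with hM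
  set C := PySem.Dict.ofList clusterCost with hC
  have hnd : M.keys.Nodup := PySem.Dict.nodup_keys_ofList clusterMetrics
  have hL : ∀ x ∈ M.items, M.getD x.1 0 = x.2 := by
    intro x hx
    exact PySem.Dict.getD_of_mem_items M (by simpa using hx) hnd 0
  rw [pv_max2_eq_max M M.items hL]
  cases hI : M.items with
  | nil =>
    have : PySem.List.sorted ([] : List (Int × Int)) (fun kv => kv.2) true = [] := rfl
    simp [PySem.List.max?, this]
  | cons x t =>
    rw [hI] at hL
    have hmax := pv_max?_cons t x
    set p0 := t.foldl (fun m x => if m.2 < x.2 then x else m) x with hp0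
    rw [hmax]
    have hsplit := pv_fold_split t x
    rw [← hp0] at hsplit
    -- the sorted list is nonempty and its head carries the maximal metric
    obtain ⟨r0, rt, hR⟩ : ∃ r0 rt,
        PySem.List.sorted (x :: t) (fun kv => kv.2) true = r0 :: rt := by
      cases h : PySem.List.sorted (x :: t) (fun kv => kv.2) true with
      | nil => exact absurd ((PySem.List.sorted_eq_nil_iff _ _ _).mp h) (by simp)
      | cons a b => exact ⟨a, b, rfl⟩
    rw [hR]
    dsimp only
    have hr0mem : r0 ∈ x :: t :=
      (PySem.List.mem_sorted _ _ _ _).mp (hR ▸ List.mem_cons_self)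
    have hp0mem : p0 ∈ x :: t := PySem.List.max?_mem hmax
    have hp0max : ∀ y ∈ x :: t, y.2 ≤ p0.2 := by
      intro y hy
      have := PySem.List.max?_isMax (key := fun kv : Int × Int => kv.2) hmax y hy
      simpa using this
    have hr0p0 : r0.2 = p0.2 :=
      le_antisymm (hp0max r0 hr0mem)
        (PySem.List.key_head_sorted_rev_ge (x :: t) (fun kv => kv.2) hR p0 hp0mem)
    -- stability: the top-metric group of the sorted list is the top-metric group in dict order
    have hstab : (r0 :: rt).filter (fun kv => kv.2 == r0.2)
        = (x :: t).filter (fun kv => kv.2 == p0.2) := by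
      rw [← hR, pv_filter_sorted_rev, hr0p0]
    rw [hstab]
    -- A's side: cover = p0.2, and the rescan is the keyed-min fold over the same filtered keys
    have hm0 : M.getD p0.1 0 = p0.2 := hL p0 hp0mem
    rw [hm0]
    rw [pv_aloop_eq p0.2 (fun k => C.getD k 0) (x :: t) p0.1]
    -- the filtered list starts with p0's own key, so the min? fold seeds itself the same way
    have hF : ∃ t', ((x :: t).filter (fun p => p.2 == p0.2)).map (·.1) = p0.1 :: t' := by
      rcases hsplit with ⟨heq, _⟩ | ⟨L1, L2, hs, hlt, hsm⟩
      · refine ⟨(t.filter (fun p => p.2 == p0.2)).map (·.1), ?_⟩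
        rw [heq, List.filter_cons, if_pos (by simp), List.map_cons]
      · refine ⟨((L2.filter (fun p => p.2 == p0.2))).map (·.1), ?_⟩
        rw [hs, List.filter_cons, if_neg (by simp; omega), List.filter_append,
          List.filter_cons, if_pos (by simp)]
        have hL1 : L1.filter (fun p => p.2 == p0.2) = [] := by
          rw [List.filter_eq_nil_iff]
          intro q hq
          have := hsm q hq
          simp
          omega
        rw [hL1, List.nil_append, List.map_cons]
    obtain ⟨t', ht'⟩ := hF
    rw [ht', pv_min?_cons (fun k => C.getD k 0) t' p0.1]
    simp only [List.foldl_cons]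
    rw [if_neg (by omega)]

-- ===== VERDICT (by name: the statement is the Claim_ definition above) =====
theorem searchMinCostMaxMetrics_fast_spec : Claim_equal_searchMinCostMaxMetrics_fast := by
  intro clusterCost clusterMetrics _ _
  unfold Spec_searchMinCostMaxMetrics_fast
  exact pv_main_eq clusterCost clusterMetrics
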